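-- pv_equiv track=rewrite | github.com/GeirOwe/adventOfCode | day22018.py | process_the_data
-- ===== SOURCE A (Python) =====
-- def check_occurences(a):
--     k = {}
--     for j in a:
--         if j in k:
--             k[j] +=1
--         else:
--             k[j] =1
--     return k
--
-- def process_the_data(theData):
--     checksum = 42
--     totalTwo = 0
--     totalThree = 0
--     #loop thru data and look for
--     #exactly two or three of any letter
--     for id in theData:
--         count_dict = check_occurences(id)
--         #the dict contains each char(k) and the number of occurences(v) of that char
--         noOfTwo = sum(value == 2 for value in count_dict.values())
--         noOfThree = sum(value == 3 for value in count_dict.values())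
--         # one id can only be counted once
--         if noOfTwo > 0: totalTwo += 1
--         if noOfThree > 0: totalThree += 1
--
--     checksum = totalTwo * totalThree
--     return checksum
-- ===== SOURCE B (Python) =====
-- def process_the_data(theData):
--     # sort each id and scan runs of equal characters instead of hashing counts
--     totalTwo = 0
--     totalThree = 0
--     for ident in theData:
--         s = sorted(ident)
--         hasTwo = False
--         hasThree = False
--         while s:
--             c = s[0]
--             run = 1
--             while run < len(s) and s[run] == c:
--                 run += 1
--             if run == 2:
--                 hasTwo = True
--             if run == 3:
--                 hasThree = True
--             s = s[run:]
--         totalTwo += hasTwo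
--         totalThree += hasThree
--     return totalTwo * totalThree
-- ===== Notes on version B (the rewrite author's own statement) =====
-- stated objective: alternative
-- what changed: Per ID, replaces the hash-map character-frequency dict plus indicator summation with sorting the ID and scanning runs of equal adjacent characters, flagging a run of length 2/3 directly.
import Mathlib
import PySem

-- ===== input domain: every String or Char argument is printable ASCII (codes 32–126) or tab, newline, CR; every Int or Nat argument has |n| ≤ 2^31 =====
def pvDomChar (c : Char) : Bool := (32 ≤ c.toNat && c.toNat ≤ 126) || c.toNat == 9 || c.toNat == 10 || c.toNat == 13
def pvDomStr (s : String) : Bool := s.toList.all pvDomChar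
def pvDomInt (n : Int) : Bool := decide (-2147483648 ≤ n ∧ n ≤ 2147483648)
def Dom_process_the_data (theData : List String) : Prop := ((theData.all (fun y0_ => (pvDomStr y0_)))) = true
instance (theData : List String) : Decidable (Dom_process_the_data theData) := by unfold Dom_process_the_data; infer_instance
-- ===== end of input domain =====

-- B replaces A's hash-map character-frequency counting with a sort-then-run-scan per ID (alternative algorithm, similar cost).

-- ===== PORT A =====
def check_occurences (a : List Char) : PySem.Dict Char Int :=
  a.foldl (fun k j => if k.contains j then k.insert j (k.getD j 0 + 1) else k.insert j 1)
    PySem.Dict.empty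

def process_the_data (theData : List String) : Int :=
  let r := theData.foldl
    (fun (acc : Int × Int) id =>
      let count_dict := check_occurences id.toList
      let noOfTwo : Int := ((count_dict.values).map (fun v => if v == 2 then (1:Int) else 0)).sum
      let noOfThree : Int := ((count_dict.values).map (fun v => if v == 3 then (1:Int) else 0)).sum
      let t2 := if noOfTwo > 0 then acc.1 + 1 else acc.1
      let t3 := if noOfThree > 0 then acc.2 + 1 else acc.2
      (t2, t3))
    (0, 0)
  r.1 * r.2

-- ===== PORT B =====
-- Source B's inner while loop: 'run' counts the leading run of equal chars (takeWhile), 's = s[run:]' drops it (dropWhile) — exact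
def scanRuns (s : List Char) (hasTwo hasThree : Bool) : Bool × Bool :=
  match s with
  | [] => (hasTwo, hasThree)
  | c :: rest =>
    let run : Nat := 1 + (rest.takeWhile (fun x => x == c)).length
    scanRuns (rest.dropWhile (fun x => x == c)) (hasTwo || run == 2) (hasThree || run == 3)
termination_by s.length
decreasing_by
  simpa using Nat.lt_succ_of_le (List.length_dropWhile_le _ rest)

def process_the_data_alt (theData : List String) : Int :=
  let r := theData.foldl
    (fun (acc : Int × Int) ident =>
      let s := PySem.List.sorted ident.toList (fun c => c) false
      let p := scanRuns s false false
      (acc.1 + (if p.1 then 1 else 0), acc.2 + (if p.2 then 1 else 0)))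
    (0, 0)
  r.1 * r.2

-- ===== PRECONDITION & SPEC =====
def Spec_process_the_data (theData : List String) (out : Int) : Prop := out = process_the_data_alt theData
instance (theData : List String) (out : Int) : Decidable (Spec_process_the_data theData out) := by unfold Spec_process_the_data; infer_instance

-- ===== CLAIM (what is proved, stated in full; the proofs are below) =====
def Claim_equal_process_the_data : Prop := ∀ (theData : List String), Dom_process_the_data theData → Spec_process_the_data theData (process_the_data theData)

-- ===== LEMMAS AND PROOFS =====

-- A's conditional insert loop is the standard counting loop
lemma check_occurences_eq_counter (l : List Char) :
    check_occurences l = PySem.Dict.counter l := by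
  have hf : (fun (k : PySem.Dict Char Int) j =>
      if k.contains j then k.insert j (k.getD j 0 + 1) else k.insert j 1)
      = (fun (k : PySem.Dict Char Int) j => k.insert j (k.getD j 0 + 1)) := by
    funext k j
    by_cases h : k.contains j
    · simp [h]
    · have h0 : k.getD j 0 = 0 := by
        have hn : k.get? j = none := by
          rw [PySem.Dict.get?_eq_none_iff_contains]; simpa using h
        simp [PySem.Dict.getD_eq_get?_getD, hn]
      simp [h, h0]
  rw [check_occurences, hf, PySem.Dict.foldl_insert_getD_add_one_eq_counter]

-- positive indicator sum over an Int list = membership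
lemma indicator_sum_pos (vs : List Int) (n : Int) :
    (0 < ((vs.map (fun v => if v == n then (1:Int) else 0)).sum)) ↔ n ∈ vs := by
  induction vs with
  | nil => simp
  | cons v vs ih =>
    have hnn : 0 ≤ ((vs.map (fun v => if v == n then (1:Int) else 0)).sum) := by
      apply List.sum_nonneg; intro x hx
      simp only [List.mem_map] at hx
      obtain ⟨w, _, hw⟩ := hx
      split at hw <;> omega
    simp only [beq_iff_eq] at ih hnn ⊢
    by_cases h : v = n
    · simp only [List.map_cons, List.sum_cons, h, if_true, List.mem_cons]
      constructor
      · intro _; simp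
      · intro _; omega
    · simp only [List.map_cons, List.sum_cons, h, if_false, List.mem_cons, zero_add]
      rw [ih]
      constructor
      · intro hm; exact Or.inr hm
      · rintro (h' | hm)
        · exact absurd h'.symm h
        · exact hm

-- A's per-id flag: some character occurs exactly n times
lemma flagA_iff (l : List Char) (n : Nat) :
    (0 < (((check_occurences l).values).map (fun v => if v == (n:Int) then (1:Int) else 0)).sum)
      ↔ ∃ c ∈ l, l.count c = n := by
  rw [check_occurences_eq_counter, indicator_sum_pos]
  have hv : (PySem.Dict.counter l).values
      = (PySem.Set.ofList l).map (fun k => (l.count k : Int)) := by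
    simp only [PySem.Dict.values, PySem.Dict.items_counter, List.map_map]
    rfl
  rw [hv]
  simp only [List.mem_map, PySem.Set.mem_ofList]
  constructor
  · rintro ⟨c, hc, hcount⟩
    refine ⟨c, hc, ?_⟩
    omega
  · rintro ⟨c, hc, hcount⟩
    refine ⟨c, hc, ?_⟩
    omega

-- the head's run in a sorted list is its whole multiplicity, and the dropped tail is c-free
lemma count_head_sorted (c : Char) (rest : List Char)
    (hp : (c :: rest).Pairwise (· ≤ ·)) :
    (c :: rest).count c = 1 + (rest.takeWhile (fun x => x == c)).length
      ∧ c ∉ rest.dropWhile (fun x => x == c) := by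
  have hle : ∀ x ∈ rest, c ≤ x := (List.pairwise_cons.mp hp).1
  have hpr : rest.Pairwise (· ≤ ·) := (List.pairwise_cons.mp hp).2
  have hdecomp : rest = rest.takeWhile (fun x => x == c) ++ rest.dropWhile (fun x => x == c) :=
    (List.takeWhile_append_dropWhile).symm
  have htake : ∀ x ∈ rest.takeWhile (fun x => x == c), x = c := by
    intro x hx
    have := List.mem_takeWhile_imp hx
    simpa using this
  have hnotin : c ∉ rest.dropWhile (fun x => x == c) := by
    intro hcmem
    cases hd : rest.dropWhile (fun x => x == c) with
    | nil => rw [hd] at hcmem; exact absurd hcmem (List.not_mem_nil)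
    | cons h t =>
      have hne : h ≠ c := by
        have hhead := List.head_dropWhile_not (p := fun x => x == c) (l := rest)
        rw [hd] at hhead
        simpa using hhead (by simp)
      have hmemrest : h ∈ rest := by
        rw [hdecomp, hd]; exact List.mem_append_right _ (List.mem_cons_self)
      have hch : c < h := lt_of_le_of_ne (hle h hmemrest) (Ne.symm hne)
      rw [hd] at hcmem
      rcases List.mem_cons.mp hcmem with h1 | h2
      · exact hne h1.symm
      · have hpd : (h :: t).Pairwise (· ≤ ·) := by
          have hsub : (rest.dropWhile (fun x => x == c)).Sublist rest := List.dropWhile_sublist _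
          have := hpr.sublist hsub
          rwa [hd] at this
        have := (List.pairwise_cons.mp hpd).1 c h2
        exact absurd hch (not_lt.mpr this)
  refine ⟨?_, hnotin⟩
  rw [List.count_cons_self]
  conv_lhs => rw [hdecomp]
  rw [List.count_append]
  have h1 : (rest.takeWhile (fun x => x == c)).count c
      = (rest.takeWhile (fun x => x == c)).length := by
    apply List.count_eq_length.mpr
    intro x hx; simpa using (htake x hx).symm
  have h2 : (rest.dropWhile (fun x => x == c)).count c = 0 :=
    List.count_eq_zero.mpr hnotin
  omega

-- characters of the dropped tail have the same multiplicity there as in the whole list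
lemma count_tail_sorted (c : Char) (rest : List Char)
    (hp : (c :: rest).Pairwise (· ≤ ·)) (x : Char)
    (hx : x ∈ rest.dropWhile (fun y => y == c)) :
    (c :: rest).count x = (rest.dropWhile (fun y => y == c)).count x := by
  have hnotin := (count_head_sorted c rest hp).2
  have hxc : x ≠ c := fun h => hnotin (h ▸ hx)
  have hdecomp : rest = rest.takeWhile (fun y => y == c) ++ rest.dropWhile (fun y => y == c) :=
    (List.takeWhile_append_dropWhile).symm
  have hcc : (c :: rest).count x = rest.count x := by
    have hcx : ¬ c = x := fun h => hxc h.symm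
    simp [hcx]
  rw [hcc]
  conv_lhs => rw [hdecomp]
  rw [List.count_append]
  have h0 : (rest.takeWhile (fun y => y == c)).count x = 0 := by
    apply List.count_eq_zero.mpr
    intro hmem
    have := List.mem_takeWhile_imp hmem
    exact hxc (by simpa using this)
  omega

-- finding a run of length n in a sorted list = some character occurs exactly n times
lemma scanRuns_spec : ∀ (N : Nat) (s : List Char), s.length ≤ N → s.Pairwise (· ≤ ·) →
    ∀ (a b : Bool), scanRuns s a b
      = (a || decide (∃ c ∈ s, s.count c = 2), b || decide (∃ c ∈ s, s.count c = 3)) := by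
  intro N
  induction N with
  | zero =>
    intro s hs _ a b
    have : s = [] := List.eq_nil_of_length_eq_zero (Nat.le_zero.mp hs)
    subst this
    simp [scanRuns]
  | succ N ih =>
    intro s hs hp a b
    cases s with
    | nil => simp [scanRuns]
    | cons c rest =>
      have hcount := (count_head_sorted c rest hp).1
      have hpd : (rest.dropWhile (fun x => x == c)).Pairwise (· ≤ ·) :=
        hp.sublist ((List.dropWhile_sublist _).cons _)
      have hlen : (rest.dropWhile (fun x => x == c)).length ≤ N := by
        have := List.length_dropWhile_le (fun x => x == c) rest
        simp at hs; omega
      rw [scanRuns]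
      rw [ih _ hlen hpd]
      have hsplit : ∀ (n : Nat), (∃ x ∈ (c :: rest), (c :: rest).count x = n)
          ↔ ((1 + (rest.takeWhile (fun x => x == c)).length) = n
              ∨ ∃ x ∈ rest.dropWhile (fun y => y == c),
                (rest.dropWhile (fun y => y == c)).count x = n) := by
        intro n
        have hdecomp : rest = rest.takeWhile (fun y => y == c) ++ rest.dropWhile (fun y => y == c) :=
          (List.takeWhile_append_dropWhile).symm
        constructor
        · rintro ⟨x, hx, hcx⟩
          by_cases hxc : x = c
          · subst hxc; left; omega
          · right
            have hxrest : x ∈ rest := by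
              rcases List.mem_cons.mp hx with h1 | h2
              · exact absurd h1 hxc
              · exact h2
            have hxdrop : x ∈ rest.dropWhile (fun y => y == c) := by
              conv at hxrest => rw [hdecomp]
              rcases List.mem_append.mp hxrest with h1 | h2
              · exact absurd (by simpa using List.mem_takeWhile_imp h1) hxc
              · exact h2
            exact ⟨x, hxdrop, by rw [← count_tail_sorted c rest hp x hxdrop]; exact hcx⟩
        · rintro (h | ⟨x, hx, hcx⟩)
          · exact ⟨c, List.mem_cons_self, by omega⟩
          · refine ⟨x, ?_, ?_⟩
            · have : x ∈ rest := by
                conv => rw [hdecomp]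
                exact List.mem_append_right _ hx
              exact List.mem_cons_of_mem _ this
            · rw [count_tail_sorted c rest hp x hx]; exact hcx
      have e2 : (a || (1 + (rest.takeWhile (fun x => x == c)).length == 2)
            || decide (∃ x ∈ rest.dropWhile (fun y => y == c),
                 (rest.dropWhile (fun y => y == c)).count x = 2))
          = (a || decide (∃ x ∈ (c :: rest), (c :: rest).count x = 2)) := by
        apply Bool.eq_iff_iff.mpr
        simp only [Bool.or_eq_true, beq_iff_eq, decide_eq_true_eq, hsplit 2, or_assoc]
      have e3 : (b || (1 + (rest.takeWhile (fun x => x == c)).length == 3)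
            || decide (∃ x ∈ rest.dropWhile (fun y => y == c),
                 (rest.dropWhile (fun y => y == c)).count x = 3))
          = (b || decide (∃ x ∈ (c :: rest), (c :: rest).count x = 3)) := by
        apply Bool.eq_iff_iff.mpr
        simp only [Bool.or_eq_true, beq_iff_eq, decide_eq_true_eq, hsplit 3, or_assoc]
      exact Prod.ext (by exact e2) (by exact e3)

-- the per-id flags of the two programs agree
lemma flagB_eq (l : List Char) :
    scanRuns (PySem.List.sorted l (fun c => c) false) false false
      = (decide (∃ c ∈ l, l.count c = 2), decide (∃ c ∈ l, l.count c = 3)) := by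
  set s := PySem.List.sorted l (fun c => c) false with hsdef
  have hperm : s.Perm l := PySem.List.sorted_perm l (fun c => c) false
  have hp : s.Pairwise (· ≤ ·) := by
    simpa using PySem.List.sorted_pairwise (key := fun c : Char => c) (xs := l)
  rw [scanRuns_spec s.length s le_rfl hp]
  have htr : ∀ (n : Nat), (∃ c ∈ s, s.count c = n) ↔ (∃ c ∈ l, l.count c = n) := by
    intro n
    constructor
    · rintro ⟨c, hc, hcount⟩
      exact ⟨c, hperm.mem_iff.mp hc, by rw [← hperm.count_eq]; exact hcount⟩
    · rintro ⟨c, hc, hcount⟩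
      exact ⟨c, hperm.mem_iff.mpr hc, by rw [hperm.count_eq]; exact hcount⟩
  simp only [Bool.false_or]
  exact Prod.ext (by simp [htr 2]) (by simp [htr 3])

-- ===== VERDICT (by name: the statement is the Claim_ definition above) =====
theorem process_the_data_spec : Claim_equal_process_the_data := by
  intro theData _
  unfold Spec_process_the_data process_the_data process_the_data_alt
  have hstep : (fun (acc : Int × Int) (id : String) =>
      let count_dict := check_occurences id.toList
      let noOfTwo : Int := ((count_dict.values).map (fun v => if v == 2 then (1:Int) else 0)).sum
      let noOfThree : Int := ((count_dict.values).map (fun v => if v == 3 then (1:Int) else 0)).sum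
      let t2 := if noOfTwo > 0 then acc.1 + 1 else acc.1
      let t3 := if noOfThree > 0 then acc.2 + 1 else acc.2
      (t2, t3))
      = (fun (acc : Int × Int) (ident : String) =>
      let s := PySem.List.sorted ident.toList (fun c => c) false
      let p := scanRuns s false false
      (acc.1 + (if p.1 then 1 else 0), acc.2 + (if p.2 then 1 else 0))) := by
    funext acc id
    simp only [flagB_eq id.toList]
    have h2 := flagA_iff id.toList 2
    have h3 := flagA_iff id.toList 3
    refine Prod.ext ?_ ?_
    · by_cases hE : ∃ c ∈ id.toList, id.toList.count c = 2
      · simp only []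
        rw [if_pos (by exact_mod_cast h2.mpr hE), if_pos (by simpa using hE)]
      · simp only []
        rw [if_neg (by intro h; exact hE (h2.mp (by exact_mod_cast h))),
            if_neg (by simpa using hE)]
        omega
    · by_cases hE : ∃ c ∈ id.toList, id.toList.count c = 3
      · simp only []
        rw [if_pos (by exact_mod_cast h3.mpr hE), if_pos (by simpa using hE)]
      · simp only []
        rw [if_neg (by intro h; exact hE (h3.mp (by exact_mod_cast h))),
            if_neg (by simpa using hE)]
        omega
  rw [hstep]
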